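-- pv_equiv track=rewrite | github.com/tlijkkkk/mark_v | leetcode-practice/leetcode_practice/two_pointers/sliding+bs/leetcode2982_longest_special_substring_thrice_2.py | longest_special_substring_thrice_ii
-- ===== SOURCE A (Python) =====
-- from typing import Dict
-- from collections import defaultdict
--
-- def longest_special_substring_thrice_ii(s: str) -> int:
--     dt_special_count: Dict[str, int] = defaultdict(int)
--     longest = -1
--
--     left = 1
--     right = len(s)
--
--     while  left <= right:
--         mid = left + (right - left) // 2
--
--         found = False
--         i = 0
--         for j in range(len(s)):
--             while s[j] != s[i] or j - i + 1 > mid: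
--                 i += 1
--
--             if j - i + 1 == mid:
--                 dt_special_count[s[i]] += 1
--
--                 if dt_special_count[s[i]] == 3:
--                     longest = mid
--                     found = True
--                     break
--         if found:
--             left = mid + 1
--         else:
--             right = mid - 1
--         dt_special_count.clear()
--
--     return longest
-- ===== SOURCE B (Python) =====
-- def longest_special_substring_thrice_ii(s: str) -> int:
--     # one pass: collect maximal runs, then closed-form best length per character
--     runs = []
--     i = 0
--     n = len(s)
--     while i < n:
--         j = i + 1
--         while j < n and s[j] == s[i]:
--             j += 1
--         runs.append((s[i], j - i))
--         i = j
--     by_char = {}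
--     for ch, ln in runs:
--         by_char.setdefault(ch, []).append(ln)
--     best = -1
--     for ls in by_char.values():
--         t = (sorted(ls, reverse=True) + [0, 0, 0])[:3]
--         cand = max(t[0] - 2, min(t[0] - 1, t[1]), t[2])
--         best = max(best, cand)
--     return best if best >= 1 else -1
-- ===== Notes on version B (the rewrite author's own statement) =====
-- stated objective: faster
-- what changed: Replaces A's binary search over candidate lengths (each probe rescanning the whole string with a two-pointer window and a counting dict) by a single pass that collects maximal equal-character runs and computes each character's answer in closed form from its three longest run lengths (max(t0-2, min(t0-1, t1), t2)).
import Mathlib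
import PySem

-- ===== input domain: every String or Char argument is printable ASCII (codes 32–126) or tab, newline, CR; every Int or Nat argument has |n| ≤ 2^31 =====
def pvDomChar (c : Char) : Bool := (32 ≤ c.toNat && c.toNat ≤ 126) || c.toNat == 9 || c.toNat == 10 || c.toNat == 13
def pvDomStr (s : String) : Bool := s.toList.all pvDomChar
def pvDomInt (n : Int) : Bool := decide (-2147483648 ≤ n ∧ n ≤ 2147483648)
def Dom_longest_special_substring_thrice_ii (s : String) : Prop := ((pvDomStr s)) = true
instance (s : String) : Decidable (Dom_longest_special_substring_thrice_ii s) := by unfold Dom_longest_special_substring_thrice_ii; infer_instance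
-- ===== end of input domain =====

-- B replaces A's binary search with two-pointer rescans by a single run-length pass and a
-- closed-form per-character answer from the three longest runs (measured faster at scale).

-- ===== PORT A =====
-- inner `while s[j] != s[i] or j - i + 1 > mid: i += 1`; the `i < j` guard only makes the
-- recursion total where Python's loop would run past j (unreachable, since A always has mid ≥ 1)
def pvAdv (l : List Char) (mid : Int) (j : Nat) : Nat → Nat → Nat
  | 0, i => i
  | fuel + 1, i =>
    if l.getD i ' ' ≠ l.getD j ' ' ∨ (j : Int) - i + 1 > mid then
      if i < j then pvAdv l mid j fuel (i + 1) else i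
    else i

-- the `for j in range(len(s))` loop with the break; returns `found`
def pvLoopA (l : List Char) (mid : Int) : Nat → Nat → Nat → PySem.Dict Char Int → Bool
  | 0, _, _, _ => false
  | fuel + 1, j, i, d =>
    if j < l.length then
      let i' := pvAdv l mid j j i
      if (j : Int) - i' + 1 = mid then
        let c := l.getD i' ' '
        let d' := d.insert c (d.getD c 0 + 1)
        if d'.getD c 0 = 3 then true
        else pvLoopA l mid fuel (j + 1) i' d'
      else pvLoopA l mid fuel (j + 1) i' d
    else false

-- the outer `while left <= right` binary search
def pvBsA (l : List Char) : Nat → Int → Int → Int → Int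
  | 0, _, _, longest => longest
  | fuel + 1, left, right, longest =>
    if left ≤ right then
      let mid := left + PySem.Int.floordiv (right - left) 2
      if pvLoopA l mid (l.length + 1) 0 0 PySem.Dict.empty then pvBsA l fuel (mid + 1) right mid
      else pvBsA l fuel left (mid - 1) longest
    else longest

def longest_special_substring_thrice_ii (s : String) : Int :=
  pvBsA s.toList (s.toList.length + 1) 1 (PySem.Str.len s) (-1)

-- ===== PORT B =====
-- inner `while j < n and s[j] == s[i]` of Source B: length of the leading block equal to c
def pvLead (c : Char) : List Char → Nat
  | [] => 0
  | x :: r => if x == c then pvLead c r + 1 else 0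

-- the outer run-collecting `while i < n` loop of Source B
def pvRuns : Nat → List Char → List (Char × Int)
  | 0, _ => []
  | _, [] => []
  | fuel + 1, c :: rest =>
    (c, (1 : Int) + pvLead c rest) :: pvRuns fuel (rest.drop (pvLead c rest))

-- `t = (sorted(ls, reverse=True) + [0,0,0])[:3]; max(t[0]-2, min(t[0]-1, t[1]), t[2])`
def pvCand (ls : List Int) : Int :=
  let t := (PySem.List.sorted ls (fun x => x) true ++ [0, 0, 0]).take 3
  max (t.getD 0 0 - 2) (max (min (t.getD 0 0 - 1) (t.getD 1 0)) (t.getD 2 0))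

def longest_special_substring_thrice_ii_alt (s : String) : Int :=
  let runs := pvRuns s.toList.length s.toList
  let byChar := runs.foldl (fun d p => d.modify p.1 [] (· ++ [p.2])) PySem.Dict.empty
  let best := byChar.values.foldl (fun b ls => max b (pvCand ls)) (-1)
  if 1 ≤ best then best else -1

-- ===== PRECONDITION & SPEC =====
def Spec_longest_special_substring_thrice_ii (s : String) (out : Int) : Prop := out = longest_special_substring_thrice_ii_alt s
instance (s : String) (out : Int) : Decidable (Spec_longest_special_substring_thrice_ii s out) := by unfold Spec_longest_special_substring_thrice_ii; infer_instance

-- ===== CLAIM (what is proved, stated in full; the proofs are below) =====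
def Claim_equal_longest_special_substring_thrice_ii : Prop := ∀ (s : String), Dom_longest_special_substring_thrice_ii s → Spec_longest_special_substring_thrice_ii s (longest_special_substring_thrice_ii s)

-- ===== LEMMAS AND PROOFS =====

-- length of the maximal run of equal characters ending at index j
def pvRunEnd (l : List Char) : Nat → Nat
  | 0 => 1
  | j + 1 => if l.getD (j + 1) ' ' = l.getD j ' ' then pvRunEnd l j + 1 else 1

-- number of indices j whose run-ending length is ≥ m and whose character is c
def pvCnt (l : List Char) (c : Char) (m : Nat) : Nat :=
  ((List.range l.length).filter (fun j => decide (l.getD j ' ' = c ∧ m ≤ pvRunEnd l j))).length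


-- well-founded twin of the fuel-guarded pvRuns, used by the proofs
def pvRunsW : List Char → List (Char × Int)
  | [] => []
  | c :: rest =>
    (c, (1 : Int) + pvLead c rest) :: pvRunsW (rest.drop (pvLead c rest))
termination_by l => l.length
decreasing_by simp

-- ideal inner pointer after the advancing while-loop at column j
def pvI (l : List Char) (mN : Nat) (j : Nat) : Nat := j + 1 - min mN (pvRunEnd l j)

lemma pvRunEnd_pos (l : List Char) (j : Nat) : 1 ≤ pvRunEnd l j := by
  cases j with
  | zero => simp [pvRunEnd]
  | succ j => simp only [pvRunEnd]; split <;> omega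

lemma pvRunEnd_le (l : List Char) (j : Nat) : pvRunEnd l j ≤ j + 1 := by
  induction j with
  | zero => simp [pvRunEnd]
  | succ j ih => simp only [pvRunEnd]; split <;> omega

lemma pvRun_char (l : List Char) (j : Nat) : ∀ k, k < pvRunEnd l j → l.getD (j - k) ' ' = l.getD j ' ' := by
  induction j with
  | zero =>
    intro k hk
    have hk0 : k = 0 := by simp [pvRunEnd] at hk; omega
    subst hk0; simp
  | succ j ih =>
    intro k hk
    simp only [pvRunEnd] at hk
    split at hk
    · rename_i heq
      cases k with
      | zero => simp
      | succ k =>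
        have h1 : j + 1 - (k + 1) = j - k := by omega
        rw [h1, ih k (by omega), heq]
    · have hk0 : k = 0 := by omega
      subst hk0; simp

lemma pvLead_le (c : Char) (r : List Char) : pvLead c r ≤ r.length := by
  induction r with
  | nil => simp [pvLead]
  | cons x r ih => simp only [pvLead]; split <;> simp <;> omega

lemma pvLead_char (c : Char) (r : List Char) : ∀ t, t < pvLead c r → r.getD t ' ' = c := by
  induction r with
  | nil => simp [pvLead]
  | cons x r ih =>
    intro t ht
    simp only [pvLead] at ht
    split at ht
    · rename_i hx
      cases t with
      | zero => simpa using hx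
      | succ t => simpa using ih t (by omega)
    · omega

lemma pvLead_stop (c : Char) (r : List Char) (h : pvLead c r < r.length) : r.getD (pvLead c r) ' ' ≠ c := by
  induction r with
  | nil => simp at h
  | cons x r ih =>
    simp only [pvLead] at h ⊢
    split at h
    · rename_i hx
      simp only [if_pos hx]
      simpa using ih (by simpa using h)
    · rename_i hx
      simp only [if_neg hx]
      simpa using hx

lemma pvRuns_eq_W : ∀ (fuel : Nat) (l : List Char), l.length ≤ fuel → pvRuns fuel l = pvRunsW l := by
  intro fuel
  induction fuel with
  | zero =>
    intro l hl
    have hnil : l = [] := by cases l <;> simp_all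
    subst hnil
    simp [pvRuns, pvRunsW]
  | succ fuel ih =>
    intro l hl
    cases l with
    | nil => simp [pvRuns, pvRunsW]
    | cons c rest =>
      rw [pvRuns, pvRunsW, ih _ (by have := pvLead_le c rest; simp at hl ⊢; omega)]

lemma count_range_ge (N a : Nat) : ((List.range N).filter (fun j => decide (a ≤ j))).length = N - a := by
  induction N with
  | zero => simp
  | succ N ih =>
    rw [List.range_succ, List.filter_append, List.length_append, ih]
    by_cases h : a ≤ N <;> simp [h] <;> omega

-- the advancing loop reaches exactly the ideal pointer
lemma pvAdv_reach (l : List Char) (mid : Int) (hm : 1 ≤ mid) (j : Nat) :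
    ∀ (fuel i : Nat),
    pvI l mid.toNat j - i ≤ fuel →
    i ≤ pvI l mid.toNat j →
    (∀ k, i ≤ k → k < pvI l mid.toNat j → (l.getD k ' ' ≠ l.getD j ' ' ∨ (j : Int) - k + 1 > mid)) →
    pvAdv l mid j fuel i = pvI l mid.toNat j := by
  have hre1 := pvRunEnd_pos l j
  have hre2 := pvRunEnd_le l j
  have hmid : (mid.toNat : Int) = mid := Int.toNat_of_nonneg (by omega)
  have hIint : (pvI l mid.toNat j : Int) = (j : Int) + 1 - min (mid.toNat : Int) (pvRunEnd l j : Int) := by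
    unfold pvI; omega
  have hch : l.getD (pvI l mid.toNat j) ' ' = l.getD j ' ' := by
    have hk : j - (min mid.toNat (pvRunEnd l j) - 1) = pvI l mid.toNat j := by
      unfold pvI; omega
    rw [← hk]
    exact pvRun_char l j _ (by omega)
  have hneg : ¬(l.getD (pvI l mid.toNat j) ' ' ≠ l.getD j ' ' ∨ (j : Int) - (pvI l mid.toNat j) + 1 > mid) := by
    rintro (h | h)
    · exact h hch
    · omega
  intro fuel
  induction fuel with
  | zero =>
    intro i hf hi hc
    have hie : i = pvI l mid.toNat j := by omega
    rw [hie]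
    rfl
  | succ fuel ih =>
    intro i hf hi hc
    by_cases hie : i = pvI l mid.toNat j
    · rw [hie]
      simp only [pvAdv]
      rw [if_neg hneg]
    · have hilt : i < pvI l mid.toNat j := by omega
      have hIj : pvI l mid.toNat j ≤ j := by unfold pvI; omega
      simp only [pvAdv]
      rw [if_pos (hc i le_rfl hilt), if_pos (show i < j by omega)]
      exact ih (i + 1) (by omega) (by omega) (fun k hk1 hk2 => hc k (by omega) hk2)

-- stepping facts: the previous ideal pointer is a valid start for column j
lemma pvI_mono (l : List Char) (mN : Nat) (hm : 1 ≤ mN) (j : Nat) :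
    pvI l mN j ≤ pvI l mN (j + 1) := by
  have h1 := pvRunEnd_pos l j
  have h2 : pvRunEnd l (j + 1) = pvRunEnd l j + 1 ∨ pvRunEnd l (j + 1) = 1 := by
    simp only [pvRunEnd]; split <;> simp
  unfold pvI
  omega

lemma pvI_cond (l : List Char) (mid : Int) (hm : 1 ≤ mid) (j : Nat) :
    ∀ k, pvI l mid.toNat j ≤ k → k < pvI l mid.toNat (j + 1) →
      (l.getD k ' ' ≠ l.getD (j + 1) ' ' ∨ ((j : Int) + 1) - k + 1 > mid) := by
  intro k hk1 hk2
  have hre1 := pvRunEnd_pos l j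
  have hre2 := pvRunEnd_le l j
  have hmid : (mid.toNat : Int) = mid := Int.toNat_of_nonneg (by omega)
  by_cases hce : l.getD (j + 1) ' ' = l.getD j ' '
  · -- same character: run extends, only the window-length condition can fire
    right
    have hre : pvRunEnd l (j + 1) = pvRunEnd l j + 1 := by
      simp only [pvRunEnd, if_pos hce]
    unfold pvI at hk1 hk2
    rw [hre] at hk2
    omega
  · -- character changes: everything from the old pointer up to j is the old character
    left
    have hre : pvRunEnd l (j + 1) = 1 := by
      simp only [pvRunEnd, if_neg hce]
    have hkj : k ≤ j := by
      unfold pvI at hk2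
      rw [hre] at hk2
      omega
    have hchar : l.getD k ' ' = l.getD j ' ' := by
      have hkge : j + 1 - pvRunEnd l j ≤ k := by
        unfold pvI at hk1; omega
      have : l.getD (j - (j - k)) ' ' = l.getD j ' ' :=
        pvRun_char l j (j - k) (by omega)
      simpa [Nat.sub_sub_self hkj] using this
    rw [hchar]
    exact fun h => hce (h.symm)

-- counting step
lemma pvCnt_aux_succ (l : List Char) (c : Char) (m j : Nat) :
    ((List.range (j + 1)).filter (fun j' => decide (l.getD j' ' ' = c ∧ m ≤ pvRunEnd l j'))).length
      = ((List.range j).filter (fun j' => decide (l.getD j' ' ' = c ∧ m ≤ pvRunEnd l j'))).length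
        + (if l.getD j ' ' = c ∧ m ≤ pvRunEnd l j then 1 else 0) := by
  rw [List.range_succ, List.filter_append, List.length_append]
  by_cases h : l.getD j ' ' = c ∧ m ≤ pvRunEnd l j
  · obtain ⟨h1, h2⟩ := h
    simp [List.filter_singleton, ← List.getD_eq_getElem?_getD, h1, h2]
  · rw [if_neg h]
    rcases Decidable.not_and_iff_or_not.mp h with h1 | h1 <;>
      simp [List.filter_singleton, ← List.getD_eq_getElem?_getD, h1]

lemma pvCnt_aux_mono (l : List Char) (c : Char) (m j : Nat) (hj : j ≤ l.length) :
    ((List.range j).filter (fun j' => decide (l.getD j' ' ' = c ∧ m ≤ pvRunEnd l j'))).length ≤ pvCnt l c m := by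
  unfold pvCnt
  have hsub : (List.range j).Sublist (List.range l.length) := List.range_sublist.mpr hj
  exact (hsub.filter _).length_le

-- the scanning loop finds a thrice-occurring special substring of length mid iff the count says so
lemma pvLoopA_char (l : List Char) (mid : Int) (hm : 1 ≤ mid) :
    ∀ fuel j i d, l.length - j ≤ fuel → j ≤ l.length →
    (i = if j = 0 then 0 else pvI l mid.toNat (j - 1)) →
    (∀ c : Char, d.getD c 0 = (((List.range j).filter (fun j' => decide (l.getD j' ' ' = c ∧ mid.toNat ≤ pvRunEnd l j'))).length : Int)) →
    (∀ c : Char, ((List.range j).filter (fun j' => decide (l.getD j' ' ' = c ∧ mid.toNat ≤ pvRunEnd l j'))).length ≤ 2) →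
    (pvLoopA l mid fuel j i d = true ↔ ∃ c ∈ l, 3 ≤ pvCnt l c mid.toNat) := by
  intro fuel
  induction fuel with
  | zero =>
    intro j i d hf hj hi hd hb
    have hje : j = l.length := by omega
    simp only [pvLoopA, Bool.false_eq_true, false_iff]
    rintro ⟨c, _, hc3⟩
    have := hb c
    rw [hje] at this
    exact absurd hc3 (by unfold pvCnt; omega)
  | succ fuel ih =>
    intro j i d hf hj hi hd hb
    by_cases hjn : j < l.length
    · have hre1 := pvRunEnd_pos l j
      have hre2 := pvRunEnd_le l j
      have hmid : (mid.toNat : Int) = mid := Int.toNat_of_nonneg (by omega)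
      have hmN : 1 ≤ mid.toNat := by omega
      have hadv : pvAdv l mid j j i = pvI l mid.toNat j := by
        cases j with
        | zero =>
          have hI0 : pvI l mid.toNat 0 = 0 := by
            unfold pvI
            have := pvRunEnd_le l 0
            have := pvRunEnd_pos l 0
            omega
          have hi0 : i = 0 := by simpa using hi
          rw [hi0]
          exact pvAdv_reach l mid hm 0 0 0 (by rw [hI0]) (by rw [hI0]) (fun k hk1 hk2 => by rw [hI0] at hk2; omega)
        | succ j' =>
          have hi' : i = pvI l mid.toNat j' := by simpa using hi
          have hIj : pvI l mid.toNat (j' + 1) ≤ j' + 1 := by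
            unfold pvI
            have := pvRunEnd_pos l (j' + 1)
            omega
          rw [hi']
          refine pvAdv_reach l mid hm (j' + 1) (j' + 1) (pvI l mid.toNat j') (by omega)
            (pvI_mono l mid.toNat hmN j') ?_
          intro k hk1 hk2
          rcases pvI_cond l mid hm j' k hk1 hk2 with h | h
          · exact Or.inl h
          · right; push_cast; push_cast at h; omega
      have hIint : (pvI l mid.toNat j : Int) = (j : Int) + 1 - min (mid.toNat : Int) (pvRunEnd l j : Int) := by
        unfold pvI; omega
      have hchI : l.getD (pvI l mid.toNat j) ' ' = l.getD j ' ' := by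
        have hk : j - (min mid.toNat (pvRunEnd l j) - 1) = pvI l mid.toNat j := by
          unfold pvI; omega
        rw [← hk]
        exact pvRun_char l j _ (by omega)
      simp only [pvLoopA]
      rw [if_pos hjn]
      simp only [hadv, hchI]
      by_cases hq : mid.toNat ≤ pvRunEnd l j
      · have hcnd : (j : Int) - (pvI l mid.toNat j : Int) + 1 = mid := by omega
        rw [if_pos hcnd]
        have hsucc := pvCnt_aux_succ l (l.getD j ' ') mid.toNat j
        rw [if_pos ⟨rfl, hq⟩] at hsucc
        have hgd : (d.insert (l.getD j ' ') (d.getD (l.getD j ' ') 0 + 1)).getD (l.getD j ' ') 0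
            = (d.getD (l.getD j ' ') 0 + 1) := PySem.Dict.getD_insert_self d _ _ _
        rw [hgd, hd (l.getD j ' ')]
        by_cases h3 : ((((List.range j).filter (fun j' => decide (l.getD j' ' ' = l.getD j ' ' ∧ mid.toNat ≤ pvRunEnd l j'))).length : Int) + 1 = 3)
        · rw [if_pos h3]
          simp only [true_iff]
          refine ⟨l.getD j ' ', ?_, ?_⟩
          · rw [List.getD_eq_getElem l ' ' hjn]
            exact List.getElem_mem hjn
          · have hmono := pvCnt_aux_mono l (l.getD j ' ') mid.toNat (j + 1) (by omega)
            omega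
        · rw [if_neg h3]
          refine ih (j + 1) (pvI l mid.toNat j) _ (by omega) (by omega) (by simp) ?_ ?_
          · intro c
            by_cases hcc : c = l.getD j ' '
            · subst hcc
              rw [PySem.Dict.getD_insert_self, pvCnt_aux_succ, if_pos ⟨rfl, hq⟩]
              push_cast; ring
            · rw [PySem.Dict.getD_insert, if_neg hcc, hd c, pvCnt_aux_succ, if_neg (fun hh => hcc hh.1.symm)]
              norm_num
          · intro c
            by_cases hcc : c = l.getD j ' '
            · rw [hcc, pvCnt_aux_succ, if_pos ⟨rfl, hq⟩]
              have := hb (l.getD j ' ')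
              omega
            · rw [pvCnt_aux_succ, if_neg (fun hh => hcc hh.1.symm)]
              simpa using hb c
      · have hcnd : ¬((j : Int) - (pvI l mid.toNat j : Int) + 1 = mid) := by omega
        rw [if_neg hcnd]
        refine ih (j + 1) (pvI l mid.toNat j) d (by omega) (by omega) (by simp) ?_ ?_
        · intro c
          rw [hd c, pvCnt_aux_succ, if_neg (fun hh => hq hh.2)]
          norm_num
        · intro c
          rw [pvCnt_aux_succ, if_neg (fun hh => hq hh.2)]
          simpa using hb c
    · have hje : j = l.length := by omega
      simp only [pvLoopA]
      rw [if_neg hjn]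
      simp only [Bool.false_eq_true, false_iff]
      rintro ⟨c, _, hc3⟩
      have := hb c
      rw [hje] at this
      exact absurd hc3 (by unfold pvCnt; omega)

lemma pvLoopA_iff (l : List Char) (mid : Int) (hm : 1 ≤ mid) :
    pvLoopA l mid (l.length + 1) 0 0 PySem.Dict.empty = true ↔ ∃ c ∈ l, 3 ≤ pvCnt l c mid.toNat := by
  refine pvLoopA_char l mid hm (l.length + 1) 0 0 PySem.Dict.empty (by omega) (by omega) rfl ?_ ?_
  · intro c; simp [PySem.Dict.getD_empty]
  · intro c; simp

-- run-structure facts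
lemma pvRuns_pos (l : List Char) : ∀ p ∈ pvRunsW l, 1 ≤ p.2 := by
  induction l using pvRunsW.induct with
  | case1 => simp [pvRunsW]
  | case2 c rest ih =>
    intro p hp
    rw [pvRunsW] at hp
    rcases List.mem_cons.mp hp with h | h
    · subst h; simp
    · exact ih p h

lemma pvRuns_chars (l : List Char) (c : Char) : c ∈ l ↔ c ∈ (pvRunsW l).map (fun p => p.1) := by
  induction l using pvRunsW.induct with
  | case1 => simp [pvRunsW]
  | case2 c0 rest ih =>
    rw [pvRunsW]
    have htake : ∀ x ∈ rest.take (pvLead c0 rest), x = c0 := by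
      intro x hx
      obtain ⟨t, ht, hxe⟩ := List.getElem_of_mem hx
      rw [List.getElem_take] at hxe
      have htl : t < pvLead c0 rest := by
        simp at ht; omega
      have := pvLead_char c0 rest t htl
      rw [List.getD_eq_getElem rest ' ' (by have := pvLead_le c0 rest; omega)] at this
      rw [← hxe]; exact this
    have hsplit : rest = rest.take (pvLead c0 rest) ++ rest.drop (pvLead c0 rest) :=
      (List.take_append_drop _ _).symm
    constructor
    · intro hc
      rcases List.mem_cons.mp hc with h | h
      · subst h; simp
      · rw [hsplit] at h
        rcases List.mem_append.mp h with h | h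
        · rw [htake c h]; simp
        · simp only [List.map_cons, List.mem_cons]
          exact Or.inr (ih.mp h)
    · intro hc
      simp only [List.map_cons, List.mem_cons] at hc
      rcases hc with h | h
      · subst h; simp
      · have := ih.mpr h
        rw [hsplit]
        exact List.mem_cons_of_mem _ (List.mem_append.mpr (Or.inr this))

lemma pvCnt_eq_runs (c : Char) (m : Nat) (hm : 1 ≤ m) : ∀ l : List Char,
    pvCnt l c m = (((pvRunsW l).filter (fun p => p.1 == c)).map (fun p => p.2.toNat + 1 - m)).sum := by
  intro l
  induction l using pvRunsW.induct with
  | case1 => rw [pvRunsW]; simp [pvCnt]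
  | case2 c0 rest ih =>
    set k := pvLead c0 rest with hk
    set rest' := rest.drop k with hrest'
    set l := c0 :: rest with hl
    have hkle : k ≤ rest.length := pvLead_le c0 rest
    have hlen : l.length = k + 1 + rest'.length := by
      simp [hl, hrest']; omega
    have A2 : ∀ j, j ≤ k → l.getD j ' ' = c0 := by
      intro j hj
      cases j with
      | zero => simp [hl]
      | succ j' =>
        have : rest.getD j' ' ' = c0 := pvLead_char c0 rest j' (by omega)
        simpa [hl] using this
    have A4 : ∀ t, t < rest'.length → l.getD (k + 1 + t) ' ' = rest'.getD t ' ' := by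
      intro t ht
      have h1 : l.getD (k + 1 + t) ' ' = rest.getD (k + t) ' ' := by
        have he : k + 1 + t = (k + t) + 1 := by omega
        rw [he]; simp [hl]
      rw [h1, List.getD_eq_getElem rest ' ' (by simp [hrest'] at ht; omega),
        List.getD_eq_getElem rest' ' ' ht]
      simp [hrest']
    have A3 : ∀ j, j ≤ k → pvRunEnd l j = j + 1 := by
      intro j hj
      induction j with
      | zero => simp [pvRunEnd]
      | succ j' ihj =>
        have h1 : l.getD (j' + 1) ' ' = l.getD j' ' ' := by
          rw [A2 _ hj, A2 _ (by omega)]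
        simp only [pvRunEnd, if_pos h1]
        rw [ihj (by omega)]
    have A5 : ∀ t, t < rest'.length → pvRunEnd l (k + 1 + t) = pvRunEnd rest' t := by
      intro t ht
      induction t with
      | zero =>
        have hkr : k < rest.length := by simp [hrest'] at ht; omega
        have hne : l.getD (k + 1) ' ' ≠ l.getD k ' ' := by
          have h0 : l.getD (k + 1 + 0) ' ' = rest'.getD 0 ' ' := A4 0 ht
          have hstop := pvLead_stop c0 rest hkr
          have hr0 : rest'.getD 0 ' ' = rest.getD k ' ' := by
            rw [List.getD_eq_getElem rest' ' ' ht, List.getD_eq_getElem rest ' ' hkr]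
            simp [hrest']
          rw [A2 k (by omega)]
          rw [show k + 1 + 0 = k + 1 by omega] at h0
          rw [h0, hr0]
          exact hstop
        rw [show k + 1 + 0 = k + 1 by omega]
        simp only [pvRunEnd, if_neg hne]
      | succ t' iht =>
        have e1 : l.getD (k + 1 + t' + 1) ' ' = rest'.getD (t' + 1) ' ' := by
          rw [show k + 1 + t' + 1 = k + 1 + (t' + 1) by omega]
          exact A4 _ ht
        have e2 : l.getD (k + 1 + t') ' ' = rest'.getD t' ' ' := A4 _ (by omega)
        rw [show k + 1 + (t' + 1) = (k + 1 + t') + 1 by omega]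
        simp only [pvRunEnd]
        rw [e1, e2, iht (by omega)]
    -- split the counting range at the first run
    have hsum : pvCnt l c m
        = ((List.range (k + 1)).filter (fun j => decide (l.getD j ' ' = c ∧ m ≤ pvRunEnd l j))).length
          + pvCnt rest' c m := by
      unfold pvCnt
      rw [hlen, List.range_add, List.filter_append, List.length_append]
      congr 1
      rw [List.filter_map, List.length_map]
      congr 1
      apply List.filter_congr
      intro t htm
      have ht : t < rest'.length := List.mem_range.mp htm
      simp only [Function.comp]
      simp only [show (fun x => k + 1 + x) t = k + 1 + t from rfl, A4 t ht, A5 t ht]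
    rw [hsum, pvRunsW]
    by_cases hc0 : c0 = c
    · have hfirst : ((List.range (k + 1)).filter (fun j => decide (l.getD j ' ' = c ∧ m ≤ pvRunEnd l j))).length
          = (k + 1) - (m - 1) := by
        rw [List.filter_congr (fun j hj => ?_), count_range_ge (k + 1) (m - 1)]
        have hjk : j ≤ k := by have := List.mem_range.mp hj; omega
        rw [A2 j hjk, A3 j hjk]
        simp only [hc0, eq_self_iff_true, true_and, decide_eq_decide]
        omega
      rw [hfirst, List.filter_cons_of_pos (by simpa using hc0), List.map_cons, List.sum_cons, ← ih]
      have : ((1 : Int) + (k : Int)).toNat = 1 + k := by omega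
      rw [this]
      omega
    · have hfirst : ((List.range (k + 1)).filter (fun j => decide (l.getD j ' ' = c ∧ m ≤ pvRunEnd l j))).length = 0 := by
        rw [List.length_eq_zero_iff]
        apply List.filter_eq_nil_iff.mpr
        intro j hj
        have hjk : j ≤ k := by have := List.mem_range.mp hj; omega
        simp only [A2 j hjk, decide_eq_true_eq]
        exact fun h => hc0 h.1
      rw [hfirst, List.filter_cons_of_neg (by simpa using hc0), ← ih]
      omega

-- closed-form candidate vs the count
lemma pvCand_iff (ls : List Int) (hpos : ∀ x ∈ ls, 1 ≤ x) (m : Int) (hm : 1 ≤ m) :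
    (m ≤ pvCand ls) ↔ 3 ≤ (ls.map (fun r => max 0 (r - m + 1))).sum := by
  have hperm : (PySem.List.sorted ls (fun x => x) true).Perm ls := PySem.List.sorted_perm ls _ true
  have hsum : (ls.map (fun r => max 0 (r - m + 1))).sum
      = ((PySem.List.sorted ls (fun x => x) true).map (fun r => max 0 (r - m + 1))).sum :=
    ((hperm.map _).sum_eq).symm
  have hpair : (PySem.List.sorted ls (fun x => x) true).Pairwise (fun a b => b ≤ a) :=
    PySem.List.sorted_pairwise_rev ls (fun x => x)
  have hposs : ∀ x ∈ PySem.List.sorted ls (fun x => x) true, 1 ≤ x := by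
    intro x hx; exact hpos x (hperm.mem_iff.mp hx)
  rw [hsum]
  unfold pvCand
  cases hsrt : PySem.List.sorted ls (fun x => x) true with
  | nil => simp; omega
  | cons a t =>
    rw [hsrt] at hpair hposs
    have ha : 1 ≤ a := hposs a (by simp)
    cases t with
    | nil => simp; omega
    | cons b t2 =>
      have hb : 1 ≤ b := hposs b (by simp)
      have hba : b ≤ a := (List.pairwise_cons.mp hpair).1 b (by simp)
      cases t2 with
      | nil => simp; omega
      | cons cc rest =>
        have hcpos : 1 ≤ cc := hposs cc (by simp)
        obtain ⟨h1p, hp2⟩ := List.pairwise_cons.mp hpair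
        obtain ⟨h2p, hp3⟩ := List.pairwise_cons.mp hp2
        obtain ⟨h3p, _⟩ := List.pairwise_cons.mp hp3
        have hcb : cc ≤ b := h2p cc (by simp)
        have hrest : ∀ x ∈ rest, x ≤ cc := h3p
        have hR : 0 ≤ (rest.map (fun r => max 0 (r - m + 1))).sum :=
          List.sum_nonneg (by intro x hx; simp at hx; obtain ⟨r, _, rfl⟩ := hx; omega)
        simp only [List.map_cons, List.sum_cons, List.cons_append, List.take_succ_cons,
          List.take_zero, List.getD_cons_zero, List.getD_cons_succ]
        by_cases hmc : m ≤ cc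
        · constructor
          · intro _; omega
          · intro _; omega
        · have hR0 : (rest.map (fun r => max 0 (r - m + 1))).sum = 0 := by
            apply List.sum_eq_zero
            intro x hx; simp at hx; obtain ⟨r, hr, rfl⟩ := hx
            have := hrest r hr; omega
          rw [hR0]
          constructor
          · intro h; omega
          · intro h; omega

lemma sum_clip_cast (m : Nat) (hm : 1 ≤ m) : ∀ rs : List Int, (∀ x ∈ rs, 1 ≤ x) →
    ((rs.map (fun r => r.toNat + 1 - m)).sum : Int) = (rs.map (fun r => max 0 (r - (m : Int) + 1))).sum := by
  intro rs
  induction rs with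
  | nil => simp
  | cons r rs ih =>
    intro hpos
    simp only [List.map_cons, List.sum_cons, Nat.cast_add]
    rw [ih (fun x hx => hpos x (List.mem_cons_of_mem _ hx))]
    have h1 : 1 ≤ r := hpos r (by simp)
    have he : ((r.toNat + 1 - m : Nat) : Int) = max 0 (r - (m : Int) + 1) := by omega
    rw [he]

-- per-character characterisation
lemma perchar (l : List Char) (c : Char) (m : Int) (hm : 1 ≤ m) :
    (3 ≤ pvCnt l c m.toNat) ↔ m ≤ pvCand (((pvRunsW l).filter (fun p => p.1 == c)).map (fun p => p.2)) := by
  have hm1 : 1 ≤ m.toNat := by omega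
  have hmc : ((m.toNat : Nat) : Int) = m := by omega
  have hpos : ∀ x ∈ ((pvRunsW l).filter (fun p => p.1 == c)).map (fun p => p.2), 1 ≤ x := by
    intro x hx
    simp only [List.mem_map, List.mem_filter] at hx
    obtain ⟨p, ⟨hp, _⟩, rfl⟩ := hx
    exact pvRuns_pos l p hp
  rw [pvCnt_eq_runs c m.toNat hm1 l, pvCand_iff _ hpos m hm]
  have e1 : ((pvRunsW l).filter (fun p => p.1 == c)).map (fun p => p.2.toNat + 1 - m.toNat)
      = (((pvRunsW l).filter (fun p => p.1 == c)).map (fun p => p.2)).map (fun r => r.toNat + 1 - m.toNat) := by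
    rw [List.map_map]; rfl
  have key : (((((pvRunsW l).filter (fun p => p.1 == c)).map (fun p => p.2.toNat + 1 - m.toNat)).sum : Nat) : Int)
      = ((((pvRunsW l).filter (fun p => p.1 == c)).map (fun p => p.2)).map (fun r => max 0 (r - m + 1))).sum := by
    rw [e1, sum_clip_cast m.toNat hm1 _ hpos, hmc]
  constructor
  · intro h
    rw [← key]
    exact_mod_cast h
  · intro h
    rw [← key] at h
    exact_mod_cast h

lemma foldl_max_iff (f : List Int → Int) (m : Int) :
    ∀ (vs : List (List Int)) (a : Int), (m ≤ vs.foldl (fun b ls => max b (f ls)) a ↔ m ≤ a ∨ ∃ ls ∈ vs, m ≤ f ls) := by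
  intro vs
  induction vs with
  | nil => simp
  | cons v vs ih =>
    intro a
    simp only [List.foldl_cons, ih (max a (f v)), List.mem_cons, le_max_iff, exists_eq_or_imp]
    tauto

lemma pvCnt_zero_of_gt (l : List Char) (c : Char) (m : Nat) (h : l.length < m) :
    pvCnt l c m = 0 := by
  unfold pvCnt
  rw [List.length_eq_zero_iff]
  apply List.filter_eq_nil_iff.mpr
  intro j hj
  have hjl : j < l.length := List.mem_range.mp hj
  have := pvRunEnd_le l j
  simp only [decide_eq_true_eq]
  intro hh
  omega

-- the grouping dict of B: lookups are the per-character run-length lists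
lemma byChar_getD (l : List Char) (c : Char) :
    ((pvRunsW l).foldl (fun d p => d.modify p.1 [] (· ++ [p.2])) PySem.Dict.empty).getD c []
      = ((pvRunsW l).filter (fun p => p.1 == c)).map (fun p => p.2) := by
  rw [PySem.Dict.getD_foldl_modify_append, PySem.Dict.getD_empty]
  simp

lemma byChar_keys (l : List Char) (c : Char) :
    (c ∈ ((pvRunsW l).foldl (fun d p => d.modify p.1 [] (· ++ [p.2])) PySem.Dict.empty).keys) ↔ c ∈ l := by
  rw [PySem.Dict.keys_foldl_modify_key, PySem.Dict.keys_empty, PySem.Set.update_nil_left,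
    PySem.Set.mem_ofList]
  exact (pvRuns_chars l c).symm

-- B's value characterisation
lemma alt_char (s : String) (m : Int) (hm : 1 ≤ m) :
    ((∃ c ∈ s.toList, 3 ≤ pvCnt s.toList c m.toNat) ↔ m ≤ longest_special_substring_thrice_ii_alt s) := by
  set l := s.toList with hl
  unfold longest_special_substring_thrice_ii_alt
  rw [← hl, pvRuns_eq_W l.length l (le_refl _)]
  set byChar := (pvRunsW l).foldl (fun d p => d.modify p.1 [] (· ++ [p.2])) PySem.Dict.empty with hbc
  set best := byChar.values.foldl (fun b ls => max b (pvCand ls)) (-1) with hbest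
  have hnodup : byChar.keys.Nodup := by
    rw [hbc]
    exact PySem.Dict.nodup_keys_foldl_modify_key _ _ _ _ _ PySem.Dict.nodup_keys_empty
  have hvals : byChar.values = byChar.keys.map (fun c => byChar.getD c []) :=
    PySem.Dict.values_eq_map_keys byChar hnodup []
  have hchain : (∃ c ∈ l, 3 ≤ pvCnt l c m.toNat) ↔ m ≤ best := by
    rw [hbest, foldl_max_iff]
    constructor
    · rintro ⟨c, hcl, hc3⟩
      right
      refine ⟨byChar.getD c [], ?_, ?_⟩
      · rw [hvals]
        exact List.mem_map_of_mem ((byChar_keys l c).mpr hcl)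
      · rw [hbc, byChar_getD]
        exact (perchar l c m hm).mp hc3
    · rintro (h | ⟨ls, hls, hm2⟩)
      · omega
      · rw [hvals] at hls
        obtain ⟨c, hck, rfl⟩ := List.mem_map.mp hls
        refine ⟨c, (byChar_keys l c).mp hck, ?_⟩
        apply (perchar l c m hm).mpr
        rw [hbc, byChar_getD] at hm2
        exact hm2
  rw [hchain]
  by_cases hb : 1 ≤ best
  · rw [if_pos hb]
  · rw [if_neg hb]
    constructor <;> intro h <;> omega

lemma alt_neg_or_pos (s : String) :
    longest_special_substring_thrice_ii_alt s = -1 ∨ 1 ≤ longest_special_substring_thrice_ii_alt s := by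
  unfold longest_special_substring_thrice_ii_alt
  dsimp only
  split
  · rename_i h; exact Or.inr h
  · exact Or.inl rfl

lemma alt_le_len (s : String) : longest_special_substring_thrice_ii_alt s ≤ s.toList.length := by
  rcases alt_neg_or_pos s with h | h
  · rw [h]; omega
  · by_contra hgt
    push_neg at hgt
    have hsel : longest_special_substring_thrice_ii_alt s ≤ longest_special_substring_thrice_ii_alt s := le_refl _
    obtain ⟨c, _, hc3⟩ := (alt_char s _ h).mpr hsel
    rw [pvCnt_zero_of_gt s.toList c _ (by omega)] at hc3
    omega

-- binary-search correctness
lemma pvBsA_correct (l : List Char) (T : Int) (hT1 : T = -1 ∨ 1 ≤ T) (hTn : T ≤ l.length)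
    (H : ∀ m : Int, 1 ≤ m → m ≤ l.length → (pvLoopA l m (l.length + 1) 0 0 PySem.Dict.empty = true ↔ m ≤ T)) :
    ∀ fuel (left right cur : Int), (right + 1 - left).toNat ≤ fuel → 1 ≤ left → right ≤ l.length → T ≤ right →
    ((cur = -1 ∧ left = 1) ∨ (cur = left - 1 ∧ 1 ≤ cur ∧ cur ≤ T)) →
    pvBsA l fuel left right cur = T := by
  intro fuel
  induction fuel with
  | zero =>
    intro left right cur hf h1 hrn hTr hinv
    show cur = T
    rcases hinv with ⟨rfl, rfl⟩ | ⟨hc1, hc2, hc3⟩ <;> omega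
  | succ fuel ih =>
    intro left right cur hf h1 hrn hTr hinv
    by_cases hlr : left ≤ right
    · simp only [pvBsA]
      rw [if_pos hlr]
      have hfd := PySem.Int.floordiv_eq_ediv_of_pos (a := right - left) (b := 2) (by norm_num)
      set mid := left + PySem.Int.floordiv (right - left) 2 with hmid
      have hmb : left ≤ mid ∧ mid ≤ right := by rw [hmid, hfd]; omega
      have hH := H mid (by omega) (by omega)
      by_cases hfound : pvLoopA l mid (l.length + 1) 0 0 PySem.Dict.empty = true
      · rw [if_pos hfound]
        have hmT : mid ≤ T := hH.mp hfound
        exact ih (mid + 1) right mid (by omega) (by omega) hrn hTr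
          (Or.inr ⟨by omega, by omega, hmT⟩)
      · rw [if_neg hfound]
        have hnT : T ≤ mid - 1 := by
          by_contra hx
          exact hfound (hH.mpr (by omega))
        exact ih left (mid - 1) cur (by omega) h1 (by omega) hnT hinv
    · simp only [pvBsA]
      rw [if_neg hlr]
      rcases hinv with ⟨rfl, rfl⟩ | ⟨hc1, hc2, hc3⟩ <;> omega

-- ===== VERDICT (by name: the statement is the Claim_ definition above) =====
theorem longest_special_substring_thrice_ii_spec : Claim_equal_longest_special_substring_thrice_ii := by
  intro s _
  unfold Spec_longest_special_substring_thrice_ii longest_special_substring_thrice_ii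
  set T := longest_special_substring_thrice_ii_alt s with hT
  have hT1 := alt_neg_or_pos s
  have hTn := alt_le_len s
  have H : ∀ m : Int, 1 ≤ m → m ≤ s.toList.length → (pvLoopA s.toList m (s.toList.length + 1) 0 0 PySem.Dict.empty = true ↔ m ≤ T) := by
    intro m hm _
    rw [pvLoopA_iff _ _ hm, alt_char s m hm]
  have hlen : PySem.Str.len s = (s.toList.length : Int) := by simp [PySem.Str.len_eq]
  rw [hlen]
  exact pvBsA_correct s.toList T hT1 hTn H (s.toList.length + 1) 1 (s.toList.length) (-1)
    (by omega) (by omega) (le_refl _) hTn (Or.inl ⟨rfl, rfl⟩)
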